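-- pv_equiv track=rewrite | github.com/RaviShekhar13/learningpython | week-08/Mom_9.py | MoM7Pos
-- ===== SOURCE A (Python) =====
-- def MoM7Pos(arr):
--     if arr==[]:
--         return 0
--     def chunk_list(lst, size):
--         return [lst[i:i + size] for i in range(0, len(lst), size)]
--
--     def median(lst):
--         lst_sorted = sorted(lst)
--         mid = len(lst_sorted) // 2
--         return lst_sorted[mid]  # Works for both even/odd; returns middle or lower middle
--
--     # Step 1 & 2: Get medians of chunks of 7
--     chunks = chunk_list(arr, 7)
--     medians = [median(chunk) for chunk in chunks]
--
--     # Step 3: Median of medians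
--     M = median(medians)
--
--     # Step 4: Sort original array
--     sorted_arr = sorted(arr)
--
--     # Step 5: Return first index of M in sorted array
--     for i, val in enumerate(sorted_arr):
--         if val == M:
--             return i
--
--     return 0  # fallback (shouldn't happen unless M is missing)
-- ===== SOURCE B (Python) =====
-- def MoM7Pos(arr):
--     if not arr:
--         return 0
--     # medians of chunks of 7, built in one pass without materialising a list of chunks
--     medians = []
--     for i in range(0, len(arr), 7):
--         chunk = sorted(arr[i:i + 7])
--         medians.append(chunk[len(chunk) // 2])
--     ms = sorted(medians)
--     M = ms[len(ms) // 2]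
--     # first index of M in sorted(arr) == number of elements strictly below M
--     return sum(1 for x in arr if x < M)
-- ===== Notes on version B (the rewrite author's own statement) =====
-- stated objective: faster
-- what changed: B replaces A's full sort of the array plus linear scan for the first index of M by a single counting pass (number of elements strictly less than M, which equals M's first index in the sorted array since M occurs in arr), and builds the chunk medians in one loop without materialising the list of chunks.
import Mathlib
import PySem

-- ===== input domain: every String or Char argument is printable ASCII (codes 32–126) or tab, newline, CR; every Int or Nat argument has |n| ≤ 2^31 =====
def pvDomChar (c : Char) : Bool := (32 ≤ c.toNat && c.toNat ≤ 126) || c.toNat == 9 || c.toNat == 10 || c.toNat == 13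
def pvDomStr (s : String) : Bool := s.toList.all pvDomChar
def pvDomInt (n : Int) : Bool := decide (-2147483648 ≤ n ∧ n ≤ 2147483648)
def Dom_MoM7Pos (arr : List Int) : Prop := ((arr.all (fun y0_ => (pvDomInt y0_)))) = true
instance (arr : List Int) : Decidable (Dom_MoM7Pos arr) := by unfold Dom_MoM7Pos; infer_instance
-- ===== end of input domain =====

-- B changes A's final stage: instead of sorting the whole array and scanning for M's first
-- index, it counts the elements strictly below M in one pass; objective: faster (constant factor).

-- ===== PORT A =====
-- median(lst): sorted(lst)[len//2]; pyGet? is exact, .getD 0 only totalises (index len//2 is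
-- always in range for the nonempty lists this is applied to, so Python never raises here)
def pvMedianA (lst : List Int) : Int :=
  let s := PySem.List.sorted lst (fun x => x) false
  (PySem.List.pyGet? s ((s.length / 2 : Nat) : Int)).getD 0

-- chunk_list(lst, size) = [lst[i:i+size] for i in range(0, len(lst), size)]
def pvChunkList (lst : List Int) (size : Int) : List (List Int) :=
  (PySem.List.pyRange 0 lst.length size).map
    (fun i => PySem.List.slice lst (some i) (some (i + size)))

-- the final 'for i, val in enumerate(sorted_arr): if val == M: return i' with fallback 0
def pvScanA : List Int → Int → Int → Int
  | [], _, _ => 0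
  | v :: rest, M, i => if v = M then i else pvScanA rest M (i + 1)

def MoM7Pos (arr : List Int) : Int :=
  if arr = [] then 0
  else
    let chunks := pvChunkList arr 7
    let medians := chunks.map pvMedianA
    let M := pvMedianA medians
    let sortedArr := PySem.List.sorted arr (fun x => x) false
    pvScanA sortedArr M 0

-- ===== PORT B =====
def MoM7Pos_alt (arr : List Int) : Int :=
  if arr = [] then 0
  else
    let medians := (PySem.List.pyRange 0 arr.length 7).foldl
      (fun acc i =>
        let chunk := PySem.List.sorted (PySem.List.slice arr (some i) (some (i + 7))) (fun x => x) false
        acc ++ [(PySem.List.pyGet? chunk ((chunk.length / 2 : Nat) : Int)).getD 0]) []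
    let ms := PySem.List.sorted medians (fun x => x) false
    let M := (PySem.List.pyGet? ms ((ms.length / 2 : Nat) : Int)).getD 0
    arr.foldl (fun acc x => if x < M then acc + 1 else acc) 0

-- ===== PRECONDITION & SPEC =====
def Spec_MoM7Pos (arr : List Int) (out : Int) : Prop := out = MoM7Pos_alt arr
instance (arr : List Int) (out : Int) : Decidable (Spec_MoM7Pos arr out) := by unfold Spec_MoM7Pos; infer_instance

-- ===== CLAIM (what is proved, stated in full; the proofs are below) =====
def Claim_equal_MoM7Pos : Prop := ∀ (arr : List Int), Dom_MoM7Pos arr → Spec_MoM7Pos arr (MoM7Pos arr)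

-- ===== LEMMAS AND PROOFS =====

-- median of a nonempty list is one of its elements
theorem pvMedianA_mem (lst : List Int) (h : lst ≠ []) : pvMedianA lst ∈ lst := by
  have hsne : PySem.List.sorted lst (fun x => x) false ≠ [] := by
    simpa [PySem.List.sorted_eq_nil_iff] using h
  have hlen : (PySem.List.sorted lst (fun x => x) false).length / 2
      < (PySem.List.sorted lst (fun x => x) false).length := by
    have : 0 < (PySem.List.sorted lst (fun x => x) false).length := List.length_pos_iff.mpr hsne
    omega
  show (PySem.List.pyGet? (PySem.List.sorted lst (fun x => x) false)
      (((PySem.List.sorted lst (fun x => x) false).length / 2 : Nat) : Int)).getD 0 ∈ lst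
  rw [PySem.List.pyGet?_ofNat _ _ hlen]
  have hm : (PySem.List.sorted lst (fun x => x) false)[(PySem.List.sorted lst (fun x => x) false).length / 2]
      ∈ PySem.List.sorted lst (fun x => x) false := List.getElem_mem hlen
  simp only [Option.getD_some]
  exact (PySem.List.mem_sorted lst (fun x => x) false _).mp hm

-- slice arr[i:i+7] is nonempty when 0 ≤ i < len
theorem pvSlice_ne_nil (arr : List Int) (i : Int) (h0 : 0 ≤ i) (hl : i < arr.length) :
    PySem.List.slice arr (some i) (some (i + 7)) ≠ [] := by
  rw [PySem.List.slice_toNat arr h0 (by omega)]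
  have h1 : i.toNat < arr.length := by omega
  have h2 : (i + 7).toNat - i.toNat = 7 := by omega
  rw [h2]
  intro hnil
  have := List.length_drop (l := arr) (i := i.toNat)
  have h3 : (List.take 7 (List.drop i.toNat arr)).length = 0 := by rw [hnil]; rfl
  simp [List.length_take, List.length_drop] at h3
  omega

-- the core index lemma: scan of a ≤-sorted list for M (else 0) returns k + #{x < M}
theorem pvScanA_count (M : Int) :
    ∀ (s : List Int), s.Pairwise (· ≤ ·) → M ∈ s →
    ∀ (k : Int), pvScanA s M k = k + (s.countP (fun x => decide (x < M)) : Int) := by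
  intro s
  induction s with
  | nil => intro _ hM; exact absurd hM (List.not_mem_nil)
  | cons h t ih =>
    intro hpw hM k
    have hle : ∀ x ∈ t, h ≤ x := (List.pairwise_cons.mp hpw).1
    have hpwt : t.Pairwise (· ≤ ·) := (List.pairwise_cons.mp hpw).2
    by_cases heq : h = M
    · -- head is M: index k, and no element of h :: t is < M
      have hcnt : (h :: t).countP (fun x => decide (x < M)) = 0 := by
        rw [List.countP_eq_zero]
        intro x hx
        rcases List.mem_cons.mp hx with rfl | hxt
        · simp [heq]
        · have := hle x hxt
          simp only [decide_eq_true_eq]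
          omega
      have hscan : pvScanA (h :: t) M k = k := by simp [pvScanA, heq]
      rw [hscan, hcnt]
      simp
    · -- head ≠ M: M ∈ t and h < M
      have hMt : M ∈ t := by
        rcases List.mem_cons.mp hM with rfl | hMt
        · exact absurd rfl heq
        · exact hMt
      have hlt : h < M := lt_of_le_of_ne (hle M hMt) heq
      have : pvScanA (h :: t) M k = pvScanA t M (k + 1) := by simp [pvScanA, heq]
      rw [this, ih hpwt hMt (k + 1), List.countP_cons]
      simp only [decide_eq_true_eq]
      rw [if_pos hlt]
      push_cast
      ring

-- B's median loop is A's map over chunks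
theorem pvMedians_eq (arr : List Int) :
    (PySem.List.pyRange 0 arr.length 7).foldl
      (fun acc i =>
        let chunk := PySem.List.sorted (PySem.List.slice arr (some i) (some (i + 7))) (fun x => x) false
        acc ++ [(PySem.List.pyGet? chunk ((chunk.length / 2 : Nat) : Int)).getD 0]) []
    = (pvChunkList arr 7).map pvMedianA := by
  unfold pvChunkList
  rw [List.map_map]
  have hbody : (fun (acc : List Int) (i : Int) =>
      let chunk := PySem.List.sorted (PySem.List.slice arr (some i) (some (i + 7))) (fun x => x) false
      acc ++ [(PySem.List.pyGet? chunk ((chunk.length / 2 : Nat) : Int)).getD 0])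
    = (fun acc i => acc ++ [pvMedianA (PySem.List.slice arr (some i) (some (i + 7)))]) := rfl
  rw [hbody, PySem.List.foldl_append_singleton_eq_map]
  rfl

theorem MoM7Pos_eq_alt (arr : List Int) : MoM7Pos arr = MoM7Pos_alt arr := by
  by_cases hnil : arr = []
  · simp [MoM7Pos, MoM7Pos_alt, hnil]
  · unfold MoM7Pos MoM7Pos_alt
    rw [if_neg hnil, if_neg hnil]
    simp only [pvMedians_eq arr]
    set medians := (pvChunkList arr 7).map pvMedianA with hmed
    set M := pvMedianA medians with hM
    -- medians is nonempty and all its elements come from arr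
    have hlen : 0 < arr.length := List.length_pos_iff.mpr hnil
    have hrange : (0 : Int) ∈ PySem.List.pyRange 0 arr.length 7 := by
      rw [PySem.List.mem_pyRange_iff_of_pos (by omega)]
      refine ⟨le_refl _, by exact_mod_cast hlen, by simp⟩
    have hmedne : medians ≠ [] := by
      rw [hmed]
      unfold pvChunkList
      intro hc
      simp only [List.map_eq_nil_iff] at hc
      rw [hc] at hrange
      exact List.not_mem_nil hrange
    have hMarr : M ∈ arr := by
      have hMmed : M ∈ medians := pvMedianA_mem medians hmedne
      rw [hmed] at hMmed
      rcases List.mem_map.mp hMmed with ⟨chunk, hchunk, hMc⟩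
      unfold pvChunkList at hchunk
      rcases List.mem_map.mp hchunk with ⟨i, hi, hslice⟩
      rw [PySem.List.mem_pyRange_iff_of_pos (by omega)] at hi
      have hne : PySem.List.slice arr (some i) (some (i + 7)) ≠ [] :=
        pvSlice_ne_nil arr i hi.1 hi.2.1
      have : M ∈ chunk := by rw [← hMc]; exact pvMedianA_mem chunk (hslice ▸ hne)
      exact PySem.List.mem_of_mem_slice arr (some i) (some (i + 7)) (hslice ▸ this)
    -- M = B's inline median-of-medians (definitionally)
    have hMeq : M =
        (PySem.List.pyGet? (PySem.List.sorted medians (fun x => x) false)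
          (((PySem.List.sorted medians (fun x => x) false).length / 2 : Nat) : Int)).getD 0 := rfl
    rw [← hMeq]
    -- scan of sorted arr = count of elements < M
    set s := PySem.List.sorted arr (fun x => x) false with hs
    have hMs : M ∈ s := (PySem.List.mem_sorted arr (fun x => x) false M).mpr hMarr
    have hpw : s.Pairwise (· ≤ ·) := PySem.List.sorted_pairwise arr (fun x => x)
    rw [pvScanA_count M s hpw hMs 0]
    have hfold : List.foldl (fun (acc : Int) (x : Int) => if x < M then acc + 1 else acc) 0 arr
        = 0 + ((arr.countP (fun x => decide (x < M)) : Nat) : Int) := by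
      have hfun : (fun (acc : Int) (x : Int) => if x < M then acc + 1 else acc)
          = (fun acc x => if decide (x < M) = true then acc + 1 else acc) := by
        funext acc x
        by_cases hx : x < M <;> simp [hx]
      rw [hfun]
      exact PySem.List.foldl_count_if (fun x => decide (x < M)) arr 0
    rw [hfold]
    have hperm : s.Perm arr := PySem.List.sorted_perm arr (fun x => x) false
    rw [hperm.countP_eq]

-- ===== VERDICT (by name: the statement is the Claim_ definition above) =====
theorem MoM7Pos_spec : Claim_equal_MoM7Pos := by
  intro arr _
  unfold Spec_MoM7Pos
  exact MoM7Pos_eq_alt arr
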